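-- pv_equiv track=rewrite | github.com/noatgnu/dna-frame-translation-plugin | translator.py | find_start_positions
-- ===== SOURCE A (Python) =====
-- from typing import List, Optional, Dict, Tuple
--
-- def find_start_positions(
--     seq: str,
--     start_codons: Optional[List[str]],
--     frame_offset: int = 0
-- ) -> List[int]:
--     """
--     Find all positions of start codons in a sequence for a given frame.
--
--     Args:
--         seq: DNA/RNA sequence string.
--         start_codons: List of start codons to search for. None means start from position 0.
--         frame_offset: Reading frame offset (0, 1, or 2).
--
--     Returns:
--         List of start positions (nucleotide indices).
--     """
--     if start_codons is None:
--         return [frame_offset]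
--
--     positions = []
--     seq_upper = seq.upper().replace("U", "T")
--     seq_length = len(seq)
--
--     for pos in range(frame_offset, seq_length - 2, 3):
--         codon = seq_upper[pos:pos + 3]
--         if codon in start_codons:
--             positions.append(pos)
--
--     return positions
-- ===== SOURCE B (Python) =====
-- def find_start_positions(seq, start_codons, frame_offset=0):
--     if start_codons is None:
--         return [frame_offset]
--     s = seq.upper().replace("U", "T")
--     hits = set()
--     for sc in start_codons:
--         if len(sc) != 3:
--             continue
--         i = s.find(sc)
--         while i != -1:
--             if i >= frame_offset and (i - frame_offset) % 3 == 0: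
--                 hits.add(i)
--             i = s.find(sc, i + 1)
--     return sorted(hits)
-- ===== Notes on version B (the rewrite author's own statement) =====
-- stated objective: alternative
-- what changed: Instead of stepping through every in-frame position and slicing a codon to test list membership, B locates each start codon's occurrences directly with repeated str.find, keeps those in the requested frame in a set, and returns them sorted.
-- outside the precondition, e.g. on find_start_positions('ATGATG', ['ATG'], -6): A returns [-6, 0, 3], B returns [0, 3]
import Mathlib
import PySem

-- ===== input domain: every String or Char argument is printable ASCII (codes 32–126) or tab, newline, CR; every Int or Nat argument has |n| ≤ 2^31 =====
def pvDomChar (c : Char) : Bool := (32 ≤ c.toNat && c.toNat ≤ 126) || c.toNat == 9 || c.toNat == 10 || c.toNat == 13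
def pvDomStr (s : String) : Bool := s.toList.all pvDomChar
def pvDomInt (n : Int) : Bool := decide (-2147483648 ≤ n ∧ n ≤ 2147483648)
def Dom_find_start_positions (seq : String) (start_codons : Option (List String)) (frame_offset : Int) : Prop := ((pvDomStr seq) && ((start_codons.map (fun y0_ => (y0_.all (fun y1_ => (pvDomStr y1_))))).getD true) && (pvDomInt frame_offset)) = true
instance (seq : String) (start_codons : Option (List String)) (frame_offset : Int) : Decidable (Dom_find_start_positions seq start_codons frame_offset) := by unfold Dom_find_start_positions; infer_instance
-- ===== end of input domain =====

-- B finds each start codon's occurrences directly with repeated str.find and returns the sorted set of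
-- in-frame hits, instead of A's slice-and-test walk over every in-frame position (alternative, not faster).


-- ===== PORT A =====
def find_start_positions (seq : String) (start_codons : Option (List String)) (frame_offset : Int) : List Int :=
  match start_codons with
  | none => [frame_offset]
  | some codons =>
    let seq_upper := PySem.Str.replace (PySem.Str.upper seq) "U" "T"
    let seq_length := PySem.Str.len seq
    (PySem.List.pyRange frame_offset (seq_length - 2) 3).foldl
      (fun positions pos =>
        let codon := PySem.Str.slice seq_upper (some pos) (some (pos + 3))
        if codons.contains codon then positions ++ [pos] else positions) []

-- ===== PORT B =====
-- the `while i != -1` find-loop of Source B; `fuel` only bounds the iteration count (i strictly increases)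
def fspLoop (s : String) (sc : String) (frame_offset : Int) (hits : PySem.Set Int) (i : Int) : Nat → PySem.Set Int
  | 0 => hits
  | fuel + 1 =>
    if i = -1 then hits
    else
      let hits' := if frame_offset ≤ i ∧ PySem.Int.mod (i - frame_offset) 3 = 0 then hits.add i else hits
      fspLoop s sc frame_offset hits' (PySem.Str.findFrom s sc (i + 1)) fuel

def find_start_positions_alt (seq : String) (start_codons : Option (List String)) (frame_offset : Int) : List Int :=
  match start_codons with
  | none => [frame_offset]
  | some codons =>
    let s := PySem.Str.replace (PySem.Str.upper seq) "U" "T"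
    let hits := codons.foldl
      (fun hits sc =>
        if PySem.Str.len sc ≠ 3 then hits
        else fspLoop s sc frame_offset hits (PySem.Str.find s sc) (s.toList.length + 1))
      (PySem.Set.ofList ([] : List Int))
    PySem.List.sorted hits (fun x => x)

-- ===== PRECONDITION & SPEC =====
-- Pre_ restricts frame_offset to the function's documented natural domain (the docstring says 0, 1 or 2):
-- for a negative offset A's slice bounds wrap to the end of the sequence, reporting accidental matches at
-- negative positions (e.g. seq "ATGATG", codons ["ATG"], offset -6 yields [-6, 0, 3]).
def Pre_find_start_positions (seq : String) (start_codons : Option (List String)) (frame_offset : Int) : Prop :=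
  start_codons = none ∨ 0 ≤ frame_offset
instance (seq : String) (start_codons : Option (List String)) (frame_offset : Int) : Decidable (Pre_find_start_positions seq start_codons frame_offset) := by unfold Pre_find_start_positions; infer_instance

def pvWitness_find_start_positions : String × Option (List String) × Int := ("atgxATGuUGA", some ["ATG", "TGA"], 1)

def Spec_find_start_positions (seq : String) (start_codons : Option (List String)) (frame_offset : Int) (out : List Int) : Prop := out = find_start_positions_alt seq start_codons frame_offset
instance (seq : String) (start_codons : Option (List String)) (frame_offset : Int) (out : List Int) : Decidable (Spec_find_start_positions seq start_codons frame_offset out) := by unfold Spec_find_start_positions; infer_instance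

-- ===== CLAIM (what is proved, stated in full; the proofs are below) =====
def Claim_equal_find_start_positions : Prop := ∀ (seq : String) (start_codons : Option (List String)) (frame_offset : Int), Dom_find_start_positions seq start_codons frame_offset → Pre_find_start_positions seq start_codons frame_offset → Spec_find_start_positions seq start_codons frame_offset (find_start_positions seq start_codons frame_offset)

-- ===== LEMMAS AND PROOFS =====

-- single-character str.replace is a pointwise map over the characters
theorem replace_single_go (o n : Char) : ∀ (fuel : Nat) (l acc : List Char), l.length ≤ fuel →
    PySem.Chars.replace.go [o] [n] fuel l acc
      = acc.reverse ++ l.map (fun c => if c = o then n else c) := by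
  intro fuel
  induction fuel with
  | zero =>
    intro l acc h
    have : l = [] := List.length_eq_zero_iff.mp (Nat.le_zero.mp h)
    subst this; simp [PySem.Chars.replace.go]
  | succ fuel ih =>
    intro l acc h
    cases l with
    | nil => simp [PySem.Chars.replace.go]
    | cons c t =>
      simp only [PySem.Chars.replace.go, List.isPrefixOf, Bool.and_true]
      by_cases hc : o = c
      · subst hc
        rw [if_pos (by simp)]
        simp only [List.length_cons, List.length_nil, List.drop_succ_cons, List.drop_zero]
        rw [ih t ([n].reverse ++ acc) (by simpa using Nat.succ_le_succ_iff.mp h)]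
        simp
      · rw [if_neg (by simpa using hc)]
        rw [ih t (c :: acc) (by simpa using Nat.succ_le_succ_iff.mp h)]
        simp [Ne.symm hc]

theorem replace_single (l : List Char) (o n : Char) :
    PySem.Chars.replace l [o] [n] = l.map (fun c => if c = o then n else c) := by
  simp only [PySem.Chars.replace]
  rw [if_neg (by simp)]
  exact replace_single_go o n l.length l [] (le_refl _)

theorem norm_toList (seq : String) :
    (PySem.Str.replace (PySem.Str.upper seq) "U" "T").toList
      = (seq.toList.map PySem.Chars.upperChar).map (fun c => if c = 'U' then 'T' else c) := by
  rw [PySem.Str.toList_replace, PySem.Str.toList_upper, PySem.Chars.upper]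
  exact replace_single _ _ _

theorem norm_length (seq : String) :
    (PySem.Str.replace (PySem.Str.upper seq) "U" "T").toList.length = seq.toList.length := by
  rw [norm_toList]; simp

-- B's find-loop leaves the hit set duplicate-free
theorem fspLoop_nodup (s sc : String) (fo : Int) : ∀ (fuel : Nat) (i : Int) (hits : PySem.Set Int),
    hits.Nodup → (fspLoop s sc fo hits i fuel).Nodup := by
  intro fuel
  induction fuel with
  | zero => intro i hits h; exact h
  | succ fuel ih =>
    intro i hits h
    simp only [fspLoop]
    split
    · exact h
    · apply ih
      split
      · exact PySem.Set.nodup_add hits i h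
      · exact h

-- what B's find-loop collects: the in-frame occurrence positions of sc at or after index k
theorem fspLoop_mem (s sc : String) (fo : Int) (hsc : sc.toList ≠ []) :
    ∀ (fuel k : Nat) (hits : PySem.Set Int), k ≤ s.toList.length → s.toList.length + 1 - k ≤ fuel →
    ∀ x : Int, x ∈ fspLoop s sc fo hits (PySem.Chars.findFrom s.toList sc.toList (k : Int)) fuel ↔
      x ∈ hits ∨ ∃ j : Nat, k ≤ j ∧ sc.toList <+: s.toList.drop j ∧ fo ≤ (j : Int) ∧
        PySem.Int.mod ((j : Int) - fo) 3 = 0 ∧ x = (j : Int) := by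
  intro fuel
  induction fuel with
  | zero => intro k hits hk hf; omega
  | succ fuel ih =>
    intro k hits hk hf x
    by_cases hr : PySem.Chars.findFrom s.toList sc.toList (k : Int) = -1
    · rw [hr]
      simp only [fspLoop, reduceIte]
      have hno := (PySem.Chars.findFrom_natCast_eq_neg_one_iff s.toList sc.toList k hk).mp hr
      constructor
      · exact Or.inl
      · rintro (h | ⟨j, hkj, hpre, -, -, -⟩)
        · exact h
        · exact absurd (by
            have : s.toList.drop j = (s.toList.drop k).drop (j - k) := by
              rw [List.drop_drop]; congr 1; omega
            rw [this] at hpre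
            exact hpre.isInfix.trans (List.drop_suffix _ _).isInfix) hno
    · obtain ⟨hkr, hpre, hmin⟩ := PySem.Chars.findFrom_natCast_spec s.toList sc.toList k hk hr
      set r := PySem.Chars.findFrom s.toList sc.toList (k : Int) with hrdef
      have hr0 : 0 ≤ r := le_trans (by positivity) hkr
      have hlen : sc.toList.length ≤ (s.toList.drop r.toNat).length := hpre.length_le
      have hscpos : 0 < sc.toList.length := List.length_pos_iff.mpr hsc
      have hjlt : r.toNat < s.toList.length := by
        simp only [List.length_drop] at hlen; omega
      have hkj : k ≤ r.toNat := by omega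
      simp only [fspLoop, if_neg hr]
      have hstep : r + 1 = ((r.toNat + 1 : Nat) : Int) := by omega
      rw [PySem.Str.findFrom_eq, hstep]
      rw [ih (r.toNat + 1) _ (by omega) (by omega) x]
      constructor
      · rintro (hmem | ⟨j, hj1, hj2, hj3, hj4, hj5⟩)
        · by_cases hP : fo ≤ r ∧ PySem.Int.mod (r - fo) 3 = 0
          · rw [if_pos hP] at hmem
            rcases (PySem.Set.mem_add hits r x).mp hmem with h | h
            · exact Or.inl h
            · refine Or.inr ⟨r.toNat, hkj, hpre, ?_, ?_, ?_⟩ <;>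
                simp only [Int.toNat_of_nonneg hr0] at * <;> tauto
          · rw [if_neg hP] at hmem
            exact Or.inl hmem
        · exact Or.inr ⟨j, by omega, hj2, hj3, hj4, hj5⟩
      · rintro (hmem | ⟨j, hj1, hj2, hj3, hj4, hj5⟩)
        · left
          split
          · exact (PySem.Set.mem_add hits r x).mpr (Or.inl hmem)
          · exact hmem
        · rcases Nat.lt_or_ge j (r.toNat + 1) with hlt | hge
          · have hj : j = r.toNat := by
              rcases Nat.lt_or_ge j r.toNat with hl | hg
              · exact absurd hj2 (hmin j hj1 hl)
              · omega
            subst hj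
            left
            have hreq : ((r.toNat : Nat) : Int) = r := Int.toNat_of_nonneg hr0
            rw [hreq] at hj3 hj4 hj5
            rw [if_pos ⟨hj3, hj4⟩]
            exact (PySem.Set.mem_add hits r _).mpr (Or.inr hj5)
          · exact Or.inr ⟨j, hge, hj2, hj3, hj4, hj5⟩

theorem fspFold_nodup (s : String) (fo : Int) (codons : List String) :
    ∀ hits : PySem.Set Int, hits.Nodup →
    (codons.foldl (fun hits sc => if PySem.Str.len sc ≠ 3 then hits
        else fspLoop s sc fo hits (PySem.Str.find s sc) (s.toList.length + 1)) hits).Nodup := by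
  induction codons with
  | nil => intro hits h; exact h
  | cons sc rest ih =>
    intro hits h
    simp only [List.foldl_cons]
    apply ih
    split
    · exact h
    · exact fspLoop_nodup s sc fo _ _ hits h

-- what B's fold over the codon list collects
theorem fspFold_mem (s : String) (fo : Int) (codons : List String) :
    ∀ (hits : PySem.Set Int) (x : Int),
    x ∈ codons.foldl (fun hits sc => if PySem.Str.len sc ≠ 3 then hits
        else fspLoop s sc fo hits (PySem.Str.find s sc) (s.toList.length + 1)) hits ↔
      x ∈ hits ∨ ∃ sc ∈ codons, sc.toList.length = 3 ∧ ∃ j : Nat, sc.toList <+: s.toList.drop j ∧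
        fo ≤ (j : Int) ∧ PySem.Int.mod ((j : Int) - fo) 3 = 0 ∧ x = (j : Int) := by
  induction codons with
  | nil => intro hits x; simp
  | cons sc rest ih =>
    intro hits x
    simp only [List.foldl_cons, ih, List.mem_cons]
    by_cases hlen : PySem.Str.len sc ≠ 3
    · rw [if_pos hlen]
      have hlen' : sc.toList.length ≠ 3 := by
        intro h; apply hlen; rw [PySem.Str.len_eq, h]; rfl
      constructor
      · rintro (h | ⟨c, hc, h3, hj⟩)
        · exact Or.inl h
        · exact Or.inr ⟨c, Or.inr hc, h3, hj⟩
      · rintro (h | ⟨c, (rfl | hc), h3, hj⟩)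
        · exact Or.inl h
        · exact absurd h3 hlen'
        · exact Or.inr ⟨c, hc, h3, hj⟩
    · rw [if_neg hlen]
      rw [not_not] at hlen
      have hlen' : sc.toList.length = 3 := by
        rw [PySem.Str.len_eq] at hlen; exact_mod_cast hlen
      have hne : sc.toList ≠ [] := by intro h; rw [h] at hlen'; simp at hlen'
      have hfind : PySem.Str.find s sc = PySem.Chars.findFrom s.toList sc.toList ((0 : Nat) : Int) := by
        rw [PySem.Str.find_eq, Nat.cast_zero, PySem.Chars.findFrom_zero]
      rw [hfind, fspLoop_mem s sc fo hne (s.toList.length + 1) 0 hits (Nat.zero_le _) (by omega) x]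
      constructor
      · rintro ((h | ⟨j, -, hj⟩) | h)
        · exact Or.inl h
        · exact Or.inr ⟨sc, Or.inl rfl, hlen', j, hj⟩
        · obtain ⟨c, hc, h3, hj⟩ := h
          exact Or.inr ⟨c, Or.inr hc, h3, hj⟩
      · rintro (h | ⟨c, (rfl | hc), h3, j, hj⟩)
        · exact Or.inl (Or.inl h)
        · exact Or.inl (Or.inr ⟨j, Nat.zero_le _, hj⟩)
        · exact Or.inr ⟨c, hc, h3, j, hj⟩

-- A's fold is a filter of the in-frame position range
theorem a_char (seq : String) (codons : List String) (fo : Int) :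
    find_start_positions seq (some codons) fo
      = (PySem.List.pyRange fo (PySem.Str.len seq - 2) 3).filter
          (fun pos => codons.contains
            (PySem.Str.slice (PySem.Str.replace (PySem.Str.upper seq) "U" "T") (some pos) (some (pos + 3)))) := by
  simp only [find_start_positions]
  rw [PySem.List.foldl_append_if
    (fun pos => codons.contains (PySem.Str.slice (PySem.Str.replace (PySem.Str.upper seq) "U" "T") (some pos) (some (pos + 3))))
    (fun pos => pos)]
  simp

theorem range_pairwise (a b : Int) : (PySem.List.pyRange a b 3).Pairwise (· < ·) := by
  rw [PySem.List.pyRange_of_pos a b (by norm_num)]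
  refine List.Pairwise.map _ ?_ List.pairwise_lt_range
  intro x y hxy
  omega

-- A's filtered range and B's hit-set description admit the same positions (for 0 ≤ frame_offset)
-- the 3-character slice at a nonnegative in-range position, as take/drop
theorem slice3 (su : String) (j : Nat) :
    (PySem.Str.slice su (some (j : Int)) (some ((j : Int) + 3))).toList = (su.toList.drop j).take 3 := by
  have h3 : (j : Int) + 3 = ((j + 3 : Nat) : Int) := by push_cast; ring
  rw [PySem.Str.toList_slice, h3, PySem.Chars.slice_eq_listSlice, PySem.List.slice_natCast]
  congr 1
  omega

-- A's filtered range and B's hit-set description admit the same positions (for 0 ≤ frame_offset)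
theorem mem_equiv (seq : String) (codons : List String) (fo : Int) (hfo : 0 ≤ fo) (x : Int) :
    (x ∈ (PySem.List.pyRange fo (PySem.Str.len seq - 2) 3).filter
          (fun pos => codons.contains
            (PySem.Str.slice (PySem.Str.replace (PySem.Str.upper seq) "U" "T") (some pos) (some (pos + 3))))) ↔
      (∃ sc ∈ codons, sc.toList.length = 3 ∧ ∃ j : Nat,
        sc.toList <+: (PySem.Str.replace (PySem.Str.upper seq) "U" "T").toList.drop j ∧
        fo ≤ (j : Int) ∧ PySem.Int.mod ((j : Int) - fo) 3 = 0 ∧ x = (j : Int)) := by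
  have hn : (PySem.Str.replace (PySem.Str.upper seq) "U" "T").toList.length = seq.toList.length :=
    norm_length seq
  rw [List.mem_filter, PySem.List.mem_pyRange_iff_of_pos (by norm_num)]
  constructor
  · rintro ⟨⟨hx1, hx2, hx3⟩, hp⟩
    have hx0 : 0 ≤ x := le_trans hfo hx1
    obtain ⟨j, rfl⟩ : ∃ j : Nat, x = (j : Int) := ⟨x.toNat, by omega⟩
    have hjb : j + 3 ≤ seq.toList.length := by
      rw [PySem.Str.len_eq] at hx2; omega
    have hmem : PySem.Str.slice (PySem.Str.replace (PySem.Str.upper seq) "U" "T")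
        (some (j : Int)) (some ((j : Int) + 3)) ∈ codons := List.contains_iff_mem.mp hp
    have hct := slice3 (PySem.Str.replace (PySem.Str.upper seq) "U" "T") j
    refine ⟨_, hmem, ?_, j, ?_, by omega, ?_, rfl⟩
    · rw [hct]; simp only [List.length_take, List.length_drop]; omega
    · rw [hct]; exact List.take_prefix _ _
    · rw [PySem.Int.mod_eq_zero_iff_dvd]; exact hx3
  · rintro ⟨sc, hmem, hlen, j, hpre, hfoj, hmod, rfl⟩
    have hjb : j + 3 ≤ seq.toList.length := by
      have := hpre.length_le
      rw [List.length_drop, hn] at this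
      omega
    have hsl : PySem.Str.slice (PySem.Str.replace (PySem.Str.upper seq) "U" "T")
        (some (j : Int)) (some ((j : Int) + 3)) = sc := by
      apply String.toList_inj.mp
      rw [slice3]
      have h := List.prefix_iff_eq_take.mp hpre
      rw [h, hlen]
    refine ⟨⟨hfoj, ?_, ?_⟩, ?_⟩
    · rw [PySem.Str.len_eq]; omega
    · rw [PySem.Int.mod_eq_zero_iff_dvd] at hmod; exact hmod
    · rw [hsl]; exact List.contains_iff_mem.mpr hmem

theorem main_some (seq : String) (codons : List String) (fo : Int) (hfo : 0 ≤ fo) :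
    find_start_positions seq (some codons) fo = find_start_positions_alt seq (some codons) fo := by
  simp only [find_start_positions_alt]
  rw [a_char]
  have hyspw : ((PySem.List.pyRange fo (PySem.Str.len seq - 2) 3).filter
          (fun pos => codons.contains
            (PySem.Str.slice (PySem.Str.replace (PySem.Str.upper seq) "U" "T") (some pos) (some (pos + 3))))).Pairwise (· < ·) :=
    (range_pairwise fo _).sublist List.filter_sublist
  have hysnd := hyspw.imp (fun h => ne_of_lt h)
  have hhnd := fspFold_nodup (PySem.Str.replace (PySem.Str.upper seq) "U" "T") fo codons
      (PySem.Set.ofList ([] : List Int)) (PySem.Set.nodup_ofList [])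
  refine (PySem.List.sorted_eq_of_perm_of_pairwise_lt _ _ (fun x => x) ?_ hyspw).symm
  rw [List.perm_ext_iff_of_nodup hysnd hhnd]
  intro a
  rw [fspFold_mem (PySem.Str.replace (PySem.Str.upper seq) "U" "T") fo codons _ a]
  rw [mem_equiv seq codons fo hfo a]
  simp [PySem.Set.ofList]

-- ===== VERDICT (by name: the statement is the Claim_ definition above) =====
theorem find_start_positions_spec : Claim_equal_find_start_positions := by
  intro seq start_codons frame_offset _ hpre
  unfold Spec_find_start_positions
  cases start_codons with
  | none => rfl
  | some codons =>
    rcases hpre with h | h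
    · exact absurd h (by simp)
    · exact main_some seq codons frame_offset h
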